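-- pv_equiv track=rewrite | github.com/kunalpro379/invictus-25 | model/server.py | get_relevant_paper_content
-- ===== SOURCE A (Python) =====
-- def get_relevant_paper_content(query, paper_chunks, top_k=3):
--     """Retrieve the most relevant chunks based on simple keyword matching."""
--     # This is a simple approach - for production, consider using embeddings and semantic search
--     query_terms = set(query.lower().split())
--     chunk_scores = []
--
--     for i, chunk in enumerate(paper_chunks):
--         chunk_lower = chunk.lower()
--         score = sum(1 for term in query_terms if term in chunk_lower)
--         chunk_scores.append((i, score))
--
--     # Sort by score in descending order and take top_k
--     relevant_indices = [
--         idx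
--         for idx, score in sorted(chunk_scores, key=lambda x: x[1], reverse=True)[:top_k]
--     ]
--     return [paper_chunks[idx] for idx in relevant_indices]
-- ===== SOURCE B (Python) =====
-- def get_relevant_paper_content(query, paper_chunks, top_k=3):
--     """Retrieve the most relevant chunks based on simple keyword matching."""
--     # Bucket (counting-sort) selection: no comparison sort, no index indirection.
--     query_terms = set(query.lower().split())
--     buckets = [[] for _ in range(len(query_terms) + 1)]
--     for chunk in paper_chunks:
--         chunk_lower = chunk.lower()
--         score = sum(1 for term in query_terms if term in chunk_lower)
--         buckets[score].append(chunk)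
--     ordered = []
--     for s in range(len(query_terms), -1, -1):
--         ordered.extend(buckets[s])
--     return ordered[:top_k]
-- ===== Notes on version B (the rewrite author's own statement) =====
-- stated objective: alternative
-- what changed: Replaces the stable reverse comparison sort over (index, score) pairs plus index indirection by a counting-sort: chunks are appended to score buckets in one pass and the buckets are concatenated from the highest possible score down, then sliced.
import Mathlib
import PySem

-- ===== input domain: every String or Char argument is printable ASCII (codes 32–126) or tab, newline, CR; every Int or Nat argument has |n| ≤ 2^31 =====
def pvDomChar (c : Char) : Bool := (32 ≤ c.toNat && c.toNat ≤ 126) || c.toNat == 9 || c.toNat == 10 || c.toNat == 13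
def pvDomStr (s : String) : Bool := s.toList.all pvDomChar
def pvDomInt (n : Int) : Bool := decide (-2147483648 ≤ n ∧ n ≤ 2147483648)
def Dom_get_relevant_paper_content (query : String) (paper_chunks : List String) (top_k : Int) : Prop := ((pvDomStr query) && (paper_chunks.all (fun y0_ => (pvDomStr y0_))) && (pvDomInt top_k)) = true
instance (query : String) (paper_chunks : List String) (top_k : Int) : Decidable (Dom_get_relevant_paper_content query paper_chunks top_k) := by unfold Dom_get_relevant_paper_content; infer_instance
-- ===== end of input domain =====

-- B replaces A's stable reverse comparison sort plus index indirection by a one-pass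
-- bucket (counting-sort) selection over scores; same results, alternative algorithm.

-- ===== PORT A =====
-- shared helper: query_terms = set(query.lower().split())   (identical line in both Pythons)
def pvTerms (query : String) : List String :=
  PySem.Set.ofList (PySem.Str.split₀ (PySem.Str.lower query))

-- shared helper: score = sum(1 for term in query_terms if term in chunk_lower)
-- (identical line in both Pythons; sum over a set is order-independent, so the fold is exact)
def pvScore (query_terms : List String) (chunk_lower : String) : Int :=
  query_terms.foldl (fun s term => if PySem.Str.isIn term chunk_lower then s + 1 else s) 0

def get_relevant_paper_content (query : String) (paper_chunks : List String) (top_k : Int) : List String :=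
  let query_terms := pvTerms query
  -- for i, chunk in enumerate(paper_chunks): chunk_scores.append((i, score))
  let chunk_scores : List (Int × Int) :=
    (PySem.List.enumerate paper_chunks).foldl
      (fun acc ic => acc ++ [(ic.1, pvScore query_terms (PySem.Str.lower ic.2))]) []
  -- sorted(chunk_scores, key=lambda x: x[1], reverse=True)[:top_k], keep the indices
  let relevant_indices : List Int :=
    (PySem.List.slice (PySem.List.sorted chunk_scores (fun x => x.2) true) none (some top_k)).map
      (fun x => x.1)
  -- paper_chunks[idx]: idx comes from enumerate, hence always in range, so pyGetD is exact
  relevant_indices.map (fun idx => PySem.List.pyGetD paper_chunks idx "")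

-- ===== PORT B =====
def get_relevant_paper_content_alt (query : String) (paper_chunks : List String) (top_k : Int) : List String :=
  let query_terms := pvTerms query
  -- buckets = [[] for _ in range(len(query_terms) + 1)]
  let buckets0 : List (List String) := List.replicate (query_terms.length + 1) []
  -- for chunk in paper_chunks: buckets[score].append(chunk)
  -- (score is a count in [0, len(query_terms)], so .toNat-indexing is exact and in range)
  let buckets : List (List String) :=
    paper_chunks.foldl
      (fun bs chunk =>
        let score := (pvScore query_terms (PySem.Str.lower chunk)).toNat
        bs.set score (bs.getD score [] ++ [chunk])) buckets0
  -- for s in range(len(query_terms), -1, -1): ordered.extend(buckets[s])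
  let ordered : List String :=
    (PySem.List.pyRange (query_terms.length : Int) (-1) (-1)).foldl
      (fun acc s => acc ++ PySem.List.pyGetD buckets s []) []
  -- ordered[:top_k]
  PySem.List.slice ordered none (some top_k)

-- ===== PRECONDITION & SPEC =====
def Spec_get_relevant_paper_content (query : String) (paper_chunks : List String) (top_k : Int) (out : List String) : Prop := out = get_relevant_paper_content_alt query paper_chunks top_k
instance (query : String) (paper_chunks : List String) (top_k : Int) (out : List String) : Decidable (Spec_get_relevant_paper_content query paper_chunks top_k out) := by unfold Spec_get_relevant_paper_content; infer_instance

-- ===== CLAIM (what is proved, stated in full; the proofs are below) =====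
def Claim_equal_get_relevant_paper_content : Prop := ∀ (query : String) (paper_chunks : List String) (top_k : Int), Dom_get_relevant_paper_content query paper_chunks top_k → Spec_get_relevant_paper_content query paper_chunks top_k (get_relevant_paper_content query paper_chunks top_k)

-- ===== LEMMAS AND PROOFS =====

-- the counting fold is a filter length
theorem foldl_count {α : Type} (p : α → Bool) (ts : List α) (a : Int) :
    ts.foldl (fun s t => if p t then s + 1 else s) a = a + ((ts.filter p).length : Int) := by
  induction ts generalizing a with
  | nil => simp
  | cons t ts ih =>
    simp only [List.foldl_cons, List.filter_cons]
    by_cases h : p t <;> simp [h, ih] <;> push_cast <;> ring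

theorem pvScore_eq_filter_length (ts : List String) (cl : String) :
    pvScore ts cl = ((ts.filter (fun t => PySem.Str.isIn t cl)).length : Int) := by
  simpa using foldl_count (fun t => PySem.Str.isIn t cl) ts 0

-- descending score list: range(n, -1, -1) = [n, n-1, ..., 0]
theorem pyRange_desc (n : Nat) :
    PySem.List.pyRange (n : Int) (-1) (-1)
      = (List.range (n + 1)).map (fun k : Nat => (n : Int) - (k : Int)) := by
  simp only [PySem.List.pyRange]
  rw [if_neg (by norm_num), if_neg (by norm_num), if_pos (by omega)]
  have h2 : (((n : Int) - (-1) + -(-1) - 1) / -(-1)).toNat = n + 1 := by norm_num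
  rw [h2]
  apply List.map_congr_left
  intro k _
  ring

-- insertion skips a block it does not go before
theorem insertBy_append_of_not_before {a : Type} (before : a → a → Bool) (x : a)
    (ys zs : List a) (h : ∀ y ∈ ys, before x y = false) :
    PySem.List.insertBy before x (ys ++ zs) = ys ++ PySem.List.insertBy before x zs := by
  induction ys with
  | nil => simp
  | cons y ys ih =>
    have hy : before x y = false := h y (by simp)
    simp only [List.cons_append, PySem.List.insertBy, hy]
    simp only [Bool.false_eq_true, if_false]
    rw [show PySem.List.insertBy before x (ys ++ zs) = ys ++ PySem.List.insertBy before x zs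
        from ih (fun y hy => h y (by simp [hy]))]

-- insertion lands at the front of a block it goes before
theorem insertBy_front {a : Type} (before : a → a → Bool) (x : a)
    (zs : List a) (h : ∀ y ∈ zs, before x y = true) :
    PySem.List.insertBy before x zs = x :: zs := by
  cases zs with
  | nil => rfl
  | cons z zs => simp [PySem.List.insertBy, h z (by simp)]

-- one insertion into a score-grouped list stays score-grouped (stability, one step)
theorem insertBy_grouped (x : Int × Int) (L : List (Int × Int)) (S : List Int)
    (hS : S.Pairwise (fun u v => v < u)) (hx : x.2 ∈ S) :
    PySem.List.insertBy (fun u v => decide (v.2 < u.2)) x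
        (S.flatMap (fun s => L.filter (fun p => p.2 == s)))
      = S.flatMap (fun s => (L ++ [x]).filter (fun p => p.2 == s)) := by
  induction S with
  | nil => simp at hx
  | cons s S ih =>
    have hlt : ∀ s' ∈ S, s' < s := fun s' hs' => (List.pairwise_cons.mp hS).1 s' hs'
    have hS' := (List.pairwise_cons.mp hS).2
    simp only [List.flatMap_cons]
    by_cases hxs : x.2 = s
    · -- x belongs to the first bucket: skip it, then land at the very front of the rest
      rw [insertBy_append_of_not_before _ _ _ _ (by
        intro y hy
        have : y.2 = s := by simpa using (List.of_mem_filter hy)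
        simp [this, hxs])]
      rw [insertBy_front _ _ _ (by
        intro y hy
        simp only [List.mem_flatMap] at hy
        obtain ⟨s', hs', hyf⟩ := hy
        have : y.2 = s' := by simpa using (List.of_mem_filter hyf)
        simp [this, hxs]
        exact hlt s' hs')]
      have hbucket : (L ++ [x]).filter (fun p => p.2 == s)
          = L.filter (fun p => p.2 == s) ++ [x] := by
        simp [List.filter_append, hxs]
      rw [hbucket]
      have hrest : S.flatMap (fun s' => (L ++ [x]).filter (fun p => p.2 == s'))
          = S.flatMap (fun s' => L.filter (fun p => p.2 == s')) := by
        apply List.flatMap_congr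
        intro s' hs'
        have := hlt s' hs'
        simp [List.filter_append, hxs]
        omega
      rw [hrest]
      simp
    · -- x belongs further down
      have hx' : x.2 ∈ S := by
        rcases List.mem_cons.mp hx with h | h
        · exact absurd h hxs
        · exact h
      have hxlt : x.2 < s := hlt _ hx'
      rw [insertBy_append_of_not_before _ _ _ _ (by
        intro y hy
        have : y.2 = s := by simpa using (List.of_mem_filter hy)
        simp [this]
        omega)]
      rw [ih hS' hx']
      have hbucket : (L ++ [x]).filter (fun p => p.2 == s)
          = L.filter (fun p => p.2 == s) := by
        simp [List.filter_append]
        omega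
      rw [hbucket]

-- Python's stable reverse sort by score = concatenation of the score classes,
-- scores taken in strictly descending order
theorem sorted_eq_grouped (L : List (Int × Int)) (S : List Int)
    (hS : S.Pairwise (fun u v => v < u)) (hL : ∀ p ∈ L, p.2 ∈ S) :
    PySem.List.sorted L (fun p => p.2) true
      = S.flatMap (fun s => L.filter (fun p => p.2 == s)) := by
  rw [PySem.List.sorted_rev_eq_foldl_insertBy]
  induction L using List.reverseRecOn with
  | nil => simp
  | append_singleton L x ih =>
    rw [List.foldl_append]
    simp only [List.foldl_cons, List.foldl_nil]
    rw [ih (fun p hp => hL p (by simp [hp]))]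
    exact insertBy_grouped x L S hS (hL x (by simp))

-- xs[:k] commutes with map
theorem slice_to_map {a b : Type} (f : a → b) (xs : List a) (k : Int) :
    (PySem.List.slice xs none (some k)).map f = PySem.List.slice (xs.map f) none (some k) := by
  simp [PySem.List.slice, List.map_take]

theorem enumerate_snd_filter (xs : List String) (q : String → Bool) :
    ∀ s0 : Int, ((PySem.List.enumerate xs s0).filter (fun ic => q ic.2)).map (fun ic => ic.2)
      = xs.filter q := by
  induction xs with
  | nil => intro s0; rfl
  | cons x xs ih =>
    intro s0
    simp only [PySem.List.enumerate, List.filter_cons]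
    by_cases h : q x <;> simp [h, ih (s0 + 1)]

-- reading back p.2 through the index p.1 of an enumerate pair
theorem enumerate_filter_lookup (xs : List String) (q : String → Bool) :
    ((PySem.List.enumerate xs).filter (fun ic => q ic.2)).map
        (fun ic => PySem.List.pyGetD xs ic.1 "")
      = xs.filter q := by
  rw [List.map_congr_left (g := fun ic : Int × String => ic.2) ?_]
  · exact enumerate_snd_filter xs q 0
  · intro ic hic
    have hic' : ic ∈ PySem.List.enumerate xs 0 := List.mem_of_mem_filter hic
    rw [PySem.List.mem_enumerate_iff] at hic'
    obtain ⟨k, hk, rfl⟩ := hic'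
    simp [PySem.List.pyGetD_natCast, List.getElem?_eq_getElem hk]

theorem self_eq_range_map (bs : List (List String)) :
    bs = (List.range bs.length).map (fun j => bs.getD j []) := by
  apply List.ext_getElem
  · simp
  · intro i h1 h2
    simp [List.getElem?_eq_getElem h1]

-- the bucket-filling loop, characterised
theorem foldl_buckets (g : String → Nat) (cs : List String) :
    ∀ (bs : List (List String)), (∀ c ∈ cs, g c < bs.length) →
    cs.foldl (fun bs c => bs.set (g c) (bs.getD (g c) [] ++ [c])) bs
      = (List.range bs.length).map (fun j => bs.getD j [] ++ cs.filter (fun c => g c == j)) := by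
  induction cs with
  | nil =>
    intro bs _
    simpa using self_eq_range_map bs
  | cons c cs ih =>
    intro bs h
    have hc : g c < bs.length := h c (by simp)
    simp only [List.foldl_cons]
    rw [ih _ (by intro c' hc'; simpa using h c' (by simp [hc']))]
    simp only [List.length_set]
    apply List.map_congr_left
    intro j hj
    have hjlen : j < bs.length := List.mem_range.mp hj
    have hget : (bs.set (g c) (bs.getD (g c) [] ++ [c])).getD j []
        = if g c = j then bs.getD (g c) [] ++ [c] else bs.getD j [] := by
      rw [List.getD_eq_getElem _ _ (by simpa using hjlen)]
      rw [List.getElem_set]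
      split
      · rfl
      · rw [List.getD_eq_getElem _ _ hjlen]
    rw [hget]
    by_cases hcj : g c = j
    · simp [hcj]
    · simp [hcj]

-- proof-side abbreviations
def pvN (query : String) : Nat := (pvTerms query).length

def pvSc (query c : String) : Int := pvScore (pvTerms query) (PySem.Str.lower c)

def pvG (query c : String) : Nat := (pvSc query c).toNat

def pvS (query : String) : List Int :=
  (List.range (pvN query + 1)).map (fun k : Nat => (pvN query : Int) - (k : Int))

def pvGrouped (query : String) (paper_chunks : List String) : List String :=
  (pvS query).flatMap (fun s => paper_chunks.filter (fun c => pvSc query c == s))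

theorem pvSc_eq (query c : String) : pvSc query c = ((pvG query c : Nat) : Int) := by
  have := pvScore_eq_filter_length (pvTerms query) (PySem.Str.lower c)
  simp only [pvG, pvSc, this]
  omega

theorem pvG_le (query c : String) : pvG query c ≤ pvN query := by
  have h1 := pvScore_eq_filter_length (pvTerms query) (PySem.Str.lower c)
  have h2 : ((pvTerms query).filter (fun t => PySem.Str.isIn t (PySem.Str.lower c))).length
      ≤ pvN query := List.length_filter_le _ _
  simp only [pvG, pvSc, h1]
  omega

theorem pvS_desc (query : String) : (pvS query).Pairwise (fun u v => v < u) := by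
  rw [pvS, List.pairwise_map]
  exact List.pairwise_lt_range.imp (by intro a b h; omega)

theorem pvS_mem (query : String) (m : Nat) (hm : m ≤ pvN query) : ((m : Nat) : Int) ∈ pvS query := by
  rw [pvS, List.mem_map]
  exact ⟨pvN query - m, List.mem_range.mpr (by omega), by push_cast; omega⟩

-- A reduces to the sliced score-grouped list
theorem A_eq (query : String) (paper_chunks : List String) (top_k : Int) :
    get_relevant_paper_content query paper_chunks top_k
      = PySem.List.slice (pvGrouped query paper_chunks) none (some top_k) := by
  simp only [get_relevant_paper_content]
  rw [PySem.List.foldl_append_singleton_eq_map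
        (fun ic : Int × String => (ic.1, pvScore (pvTerms query) (PySem.Str.lower ic.2)))]
  rw [List.nil_append]
  rw [sorted_eq_grouped _ (pvS query) (pvS_desc query) (by
    intro p hp
    rw [List.mem_map] at hp
    obtain ⟨ic, _, rfl⟩ := hp
    show pvSc query ic.2 ∈ pvS query
    rw [pvSc_eq]
    exact pvS_mem query _ (pvG_le query ic.2))]
  rw [List.map_map, slice_to_map]
  simp only [pvGrouped]
  refine congrArg (fun l => PySem.List.slice l none (some top_k)) ?_
  rw [List.map_flatMap]
  apply List.flatMap_congr
  intro s _
  rw [List.filter_map, List.map_map]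
  have h := enumerate_filter_lookup paper_chunks (fun c => pvSc query c == s)
  simp only [pvSc] at h
  exact h

-- B reduces to the same sliced score-grouped list
theorem B_eq (query : String) (paper_chunks : List String) (top_k : Int) :
    get_relevant_paper_content_alt query paper_chunks top_k
      = PySem.List.slice (pvGrouped query paper_chunks) none (some top_k) := by
  simp only [get_relevant_paper_content_alt]
  rw [foldl_buckets (fun chunk => (pvScore (pvTerms query) (PySem.Str.lower chunk)).toNat)
        paper_chunks _ (by
    intro c _
    simp only [List.length_replicate]
    have h := pvG_le query c
    simp only [pvG, pvSc, pvN] at h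
    omega)]
  rw [PySem.List.foldl_append_eq_flatMap, List.nil_append, pyRange_desc]
  simp only [pvGrouped, pvS, pvN]
  refine congrArg (fun l => PySem.List.slice l none (some top_k)) ?_
  rw [List.flatMap_map, List.flatMap_map]
  apply List.flatMap_congr
  intro j hj
  have hjn : j < (pvTerms query).length + 1 := List.mem_range.mp hj
  have hcast : ((pvTerms query).length : Int) - (j : Int) = ((((pvTerms query).length - j : Nat)) : Int) := by
    push_cast; omega
  rw [hcast, PySem.List.pyGetD_natCast]
  rw [List.getD_eq_getElem _ _ (by
    simp only [List.length_map, List.length_range, List.length_replicate]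
    omega)]
  simp only [List.getElem_map, List.getElem_range, List.length_replicate]
  rw [List.getD_eq_getElem _ _ (by simp only [List.length_replicate]; omega)]
  simp only [List.getElem_replicate, List.nil_append]
  apply List.filter_congr
  intro c _
  simp only [pvSc, pvScore_eq_filter_length]
  rw [Bool.eq_iff_iff]
  simp only [beq_iff_eq]
  omega

-- ===== VERDICT (by name: the statement is the Claim_ definition above) =====
theorem get_relevant_paper_content_spec : Claim_equal_get_relevant_paper_content := by
  intro query paper_chunks top_k _hdom
  unfold Spec_get_relevant_paper_content
  rw [A_eq, B_eq]
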